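-- pv_equiv track=rewrite | github.com/AngelicaDiazB14/CLASESP. | clase 1 intro.py | construirPrimos_aux
-- ===== SOURCE A (Python) =====
-- def esNumeroPrimo(num):
--     if(isinstance(num,int)):
--         if(num == 1 or num == 0):
--             return False
--         elif(num == 2):
--             return True
--         else:
--             if(num < 0):
--                 num = -1 * num
--                 return esNumeroPrimo_aux(num,2)
--             else:
--                 return esNumeroPrimo_aux(num,2)
--     else:
--         return "Error: el número ingresado debe ser de tipo entero"
--
-- def esNumeroPrimo_aux(num,digito):
--     if(num == digito):
--         return True
--     else:
--         if((num % digito) == 0):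
--             return False
--         else:
--             return  True and esNumeroPrimo_aux(num, digito + 1) # con pila, se puede hacer así con operaciones boolenas
--
-- def construirPrimos_aux(num,potencia):
--     if(num == 0):
--         return 0
--     else:
--         digito = num%10
--         if(esNumeroPrimo(digito)):
--             return (digito *(10**potencia))+ construirPrimos_aux(num//10,potencia+1)
--         else:
--             return construirPrimos_aux(num//10,potencia)
-- ===== SOURCE B (Python) =====
-- def construirPrimos_aux(num, potencia):
--     result = 0
--     pot = potencia
--     n = num
--     while n != 0:
--         d = n % 10
--         n //= 10
--         if d in {2, 3, 5, 7}:
--             result += d * (10 ** pot)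
--             pot += 1
--     return result
-- ===== Notes on version B (the rewrite author's own statement) =====
-- stated objective: simpler
-- what changed: Replaces A's recursion (and its recursive trial-division primality test per digit) with a single accumulator while-loop that keeps a digit iff it is in the literal set {2,3,5,7}.
-- outside the precondition, e.g. on construirPrimos_aux(14, -1): A returns 0, B returns 0; on construirPrimos_aux(23, -1): A returns 2.3, B returns 2.3
import Mathlib
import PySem

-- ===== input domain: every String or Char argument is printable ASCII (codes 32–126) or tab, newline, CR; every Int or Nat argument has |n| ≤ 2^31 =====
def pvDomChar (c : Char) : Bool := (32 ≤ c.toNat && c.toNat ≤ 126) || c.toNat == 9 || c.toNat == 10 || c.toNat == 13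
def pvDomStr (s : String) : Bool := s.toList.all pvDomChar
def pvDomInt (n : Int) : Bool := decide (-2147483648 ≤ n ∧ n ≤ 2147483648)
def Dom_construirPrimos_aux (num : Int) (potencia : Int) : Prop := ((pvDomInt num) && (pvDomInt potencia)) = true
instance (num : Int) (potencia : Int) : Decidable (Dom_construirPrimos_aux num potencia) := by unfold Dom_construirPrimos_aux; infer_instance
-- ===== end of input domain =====

-- B replaces A's recursion and per-digit recursive primality test with one accumulator
-- loop over the digits testing membership in {2,3,5,7} (objective: simpler).

-- ===== PORT A =====
-- esNumeroPrimo_aux(num, digito): fueled transliteration; under Pre_ the digit argument is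
-- 0..9 and fuel num.toNat suffices (recursion stops at digito = num or a divisor).
def pvEsNumeroPrimoAux (fuel : Nat) (num : Int) (digito : Int) : Bool :=
  match fuel with
  | 0 => true
  | f + 1 =>
    if num == digito then true
    else if PySem.Int.mod num digito == 0 then false
    else pvEsNumeroPrimoAux f num (digito + 1)

def pvEsNumeroPrimo (num : Int) : Bool :=
  if num == 1 || num == 0 then false
  else if num == 2 then true
  else if num < 0 then pvEsNumeroPrimoAux (-num).toNat (-num) 2
  else pvEsNumeroPrimoAux num.toNat num 2

-- fueled transliteration of A's recursion; fuel num.toNat + 1 covers every num ≥ 0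
-- (num//10 strictly decreases towards 0).  10**potencia is ported as 10 ^ potencia.toNat,
-- exact for potencia ≥ 0 (Pre_ requires it: Python returns a float for potencia < 0).
def pvAGo (fuel : Nat) (num : Int) (potencia : Int) : Int :=
  match fuel with
  | 0 => 0
  | f + 1 =>
    if num == 0 then 0
    else
      let digito := PySem.Int.mod num 10
      if pvEsNumeroPrimo digito then
        digito * 10 ^ potencia.toNat + pvAGo f (PySem.Int.floordiv num 10) (potencia + 1)
      else pvAGo f (PySem.Int.floordiv num 10) potencia

def construirPrimos_aux (num : Int) (potencia : Int) : Int :=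
  pvAGo (num.toNat + 1) num potencia

-- ===== PORT B =====
-- the while-loop of Source B, state (n, pot, result), fueled the same way
def pvBLoop (fuel : Nat) (n : Int) (pot : Int) (result : Int) : Int :=
  match fuel with
  | 0 => result
  | f + 1 =>
    if n == 0 then result
    else
      let d := PySem.Int.mod n 10
      let n' := PySem.Int.floordiv n 10
      if d == 2 || d == 3 || d == 5 || d == 7 then
        pvBLoop f n' (pot + 1) (result + d * 10 ^ pot.toNat)
      else
        pvBLoop f n' pot result

def construirPrimos_aux_alt (num : Int) (potencia : Int) : Int :=
  pvBLoop (num.toNat + 1) num potencia 0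

-- ===== PRECONDITION & SPEC =====
-- Pre_ excludes num < 0, where A recurses without reaching 0 (RecursionError) and B loops
-- forever, and potencia < 0, where 10**potencia is a float so A leaves the int type whenever
-- a prime digit occurs (and the remaining negative-potencia inputs without prime digits, on
-- which both return 0, are excluded with them for a uniform closed-form condition).
def Pre_construirPrimos_aux (num : Int) (potencia : Int) : Prop := 0 ≤ num ∧ 0 ≤ potencia
instance (num : Int) (potencia : Int) : Decidable (Pre_construirPrimos_aux num potencia) := by
  unfold Pre_construirPrimos_aux; infer_instance

def pvWitness_construirPrimos_aux : Int × Int := (2357, 1)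

def Spec_construirPrimos_aux (num : Int) (potencia : Int) (out : Int) : Prop := out = construirPrimos_aux_alt num potencia
instance (num : Int) (potencia : Int) (out : Int) : Decidable (Spec_construirPrimos_aux num potencia out) := by unfold Spec_construirPrimos_aux; infer_instance

-- ===== CLAIM (what is proved, stated in full; the proofs are below) =====
def Claim_equal_construirPrimos_aux : Prop := ∀ (num : Int) (potencia : Int), Dom_construirPrimos_aux num potencia → Pre_construirPrimos_aux num potencia → Spec_construirPrimos_aux num potencia (construirPrimos_aux num potencia)

-- ===== LEMMAS AND PROOFS =====

-- A's primality test agrees with B's set membership on the single digits 0..9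
theorem pvPrimeDigit (d : Int) (h0 : 0 ≤ d) (h9 : d < 10) :
    pvEsNumeroPrimo d = (d == 2 || d == 3 || d == 5 || d == 7) := by
  interval_cases d <;> decide

-- B's loop with accumulator computes acc + A's recursion, for the same fuel
theorem pvLoopEq (fuel : Nat) : ∀ (n pot acc : Int),
    pvBLoop fuel n pot acc = acc + pvAGo fuel n pot := by
  induction fuel with
  | zero => intro n pot acc; simp [pvBLoop, pvAGo]
  | succ f ih =>
    intro n pot acc
    by_cases hn : n = 0
    · simp [pvBLoop, pvAGo, hn]
    · have hmod0 : 0 ≤ PySem.Int.mod n 10 := PySem.Int.mod_nonneg n (by norm_num)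
      have hmod9 : PySem.Int.mod n 10 < 10 := PySem.Int.mod_lt n (by norm_num)
      simp only [pvBLoop, pvAGo, hn, beq_iff_eq,
        pvPrimeDigit _ hmod0 hmod9]
      by_cases hp : (PySem.Int.mod n 10 == 2 || PySem.Int.mod n 10 == 3 ||
          PySem.Int.mod n 10 == 5 || PySem.Int.mod n 10 == 7) = true
      · rw [if_pos hp, if_pos hp, ih]; norm_num; ring
      · rw [if_neg hp, if_neg hp, ih]; norm_num

-- ===== VERDICT (by name: the statement is the Claim_ definition above) =====
theorem construirPrimos_aux_spec : Claim_equal_construirPrimos_aux := by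
  intro num potencia _ _
  unfold Spec_construirPrimos_aux construirPrimos_aux construirPrimos_aux_alt
  rw [pvLoopEq]
  ring
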